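-- pv_equiv track=rewrite | github.com/Elbria/xformal-FoST | rule_based/utils.py | normalization_edit
-- ===== SOURCE A (Python) =====
-- def normalization_edit(informal_changed, formal_changed, abbreviations):
--     edits = 0
--     for i_token in informal_changed:
--         if i_token in abbreviations.keys():
--             replace_i_token = abbreviations[i_token]
--             if replace_i_token in formal_changed:
--                 edits += 1
--     return edits
-- ===== SOURCE B (Python) =====
-- def normalization_edit(informal_changed, formal_changed, abbreviations):
--     # Build a multiplicity table of the informal tokens, then drive the loop
--     # by the abbreviation table: each entry whose expansion occurs in the
--     # formal set contributes the multiplicity of its key.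
--     counts = {}
--     for t in informal_changed:
--         counts[t] = counts.get(t, 0) + 1
--     formal_set = set(formal_changed)
--     total = 0
--     for k, v in abbreviations.items():
--         if v in formal_set:
--             total += counts.get(k, 0)
--     return total
-- ===== Notes on version B (the rewrite author's own statement) =====
-- stated objective: faster
-- what changed: B inverts the loop driver: it builds a Counter-style multiplicity table of the informal tokens in one pass, then iterates over abbreviations.items() summing the multiplicity of each key whose expansion lies in set(formal_changed) — correct because dict keys are unique, so each informal token is counted by exactly one entry; A instead loops per informal token with a dict lookup plus a linear scan of formal_changed.
import Mathlib
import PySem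

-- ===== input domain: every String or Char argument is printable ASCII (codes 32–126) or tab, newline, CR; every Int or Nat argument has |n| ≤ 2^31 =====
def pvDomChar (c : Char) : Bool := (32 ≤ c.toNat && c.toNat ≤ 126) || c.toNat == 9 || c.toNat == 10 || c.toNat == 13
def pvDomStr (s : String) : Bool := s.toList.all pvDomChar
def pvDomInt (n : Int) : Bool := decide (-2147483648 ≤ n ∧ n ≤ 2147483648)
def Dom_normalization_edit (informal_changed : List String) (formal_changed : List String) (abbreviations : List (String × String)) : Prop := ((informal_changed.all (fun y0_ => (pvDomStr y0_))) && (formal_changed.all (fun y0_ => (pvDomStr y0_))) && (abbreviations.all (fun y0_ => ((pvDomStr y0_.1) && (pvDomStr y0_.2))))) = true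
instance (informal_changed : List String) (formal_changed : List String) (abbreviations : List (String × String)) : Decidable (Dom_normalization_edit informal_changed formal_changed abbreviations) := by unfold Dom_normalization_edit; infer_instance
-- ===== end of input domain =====

-- B inverts the loop driver: a multiplicity table of the informal tokens, then one pass over the
-- abbreviation items summing the multiplicity of each key whose expansion lies in set(formal_changed)
-- (objective: faster — removes A's per-token linear scan of formal_changed).


-- ===== PORT A =====
def normalization_edit (informal_changed : List String) (formal_changed : List String) (abbreviations : List (String × String)) : Int :=
  informal_changed.foldl (fun edits i_token =>
    if (PySem.Dict.ofList abbreviations).contains i_token then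
      match (PySem.Dict.ofList abbreviations).get? i_token with
      | some replace_i_token =>
          if formal_changed.contains replace_i_token then edits + 1 else edits
      | none => edits
    else edits) 0

-- ===== PORT B =====
def normalization_edit_alt (informal_changed : List String) (formal_changed : List String) (abbreviations : List (String × String)) : Int :=
  let counts : PySem.Dict String Int :=
    informal_changed.foldl (fun d t => d.insert t (d.getD t 0 + 1)) PySem.Dict.empty
  let formal_set : PySem.Set String := PySem.Set.ofList formal_changed
  (PySem.Dict.ofList abbreviations).items.foldl
    (fun total p => if PySem.Set.contains formal_set p.2 then total + counts.getD p.1 0 else total) 0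

-- ===== PRECONDITION & SPEC =====
def Spec_normalization_edit (informal_changed : List String) (formal_changed : List String) (abbreviations : List (String × String)) (out : Int) : Prop := out = normalization_edit_alt informal_changed formal_changed abbreviations
instance (informal_changed : List String) (formal_changed : List String) (abbreviations : List (String × String)) (out : Int) : Decidable (Spec_normalization_edit informal_changed formal_changed abbreviations out) := by unfold Spec_normalization_edit; infer_instance

-- ===== CLAIM (what is proved, stated in full; the proofs are below) =====
def Claim_equal_normalization_edit : Prop := ∀ (informal_changed : List String) (formal_changed : List String) (abbreviations : List (String × String)), Dom_normalization_edit informal_changed formal_changed abbreviations → Spec_normalization_edit informal_changed formal_changed abbreviations (normalization_edit informal_changed formal_changed abbreviations)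

-- ===== LEMMAS AND PROOFS =====

-- countP of a disjunction of pointwise-disjoint tests splits.
theorem pv_countP_or_disjoint {α : Type} (l : List α) (a b : α → Bool)
    (h : ∀ x, ¬(a x = true ∧ b x = true)) :
    l.countP (fun x => a x || b x) = l.countP a + l.countP b := by
  induction l with
  | nil => simp
  | cons x l ih =>
      simp only [List.countP_cons, ih]
      cases ha : a x <;> cases hb : b x <;> simp_all <;> omega

-- Counting tokens that match SOME entry of a key-distinct pair list equals summing,
-- per qualifying entry, the multiplicity of its key (keys are distinct, so each token
-- is counted by at most one entry).
theorem pv_key_sum (informal : List String) (ps : List (String × String)) (q : String × String → Bool)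
    (hnd : (ps.map Prod.fst).Nodup) :
    (informal.countP (fun t => ps.any (fun p => p.1 == t && q p)) : Int) =
      (ps.map (fun p => if q p then (informal.count p.1 : Int) else 0)).sum := by
  induction ps with
  | nil => simp
  | cons p ps ih =>
      simp only [List.map_cons, List.nodup_cons] at hnd
      have hdisj : ∀ t, ¬((p.1 == t && q p) = true ∧
          (ps.any (fun r => r.1 == t && q r)) = true) := by
        rintro t ⟨h1, h2⟩
        simp only [Bool.and_eq_true] at h1
        have ht : p.1 = t := eq_of_beq h1.1
        rcases List.any_eq_true.1 h2 with ⟨r, hr, hrt⟩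
        simp only [Bool.and_eq_true] at hrt
        have : r.1 = t := eq_of_beq hrt.1
        exact hnd.1 (ht ▸ this ▸ List.mem_map_of_mem hr)
      have hsplit := pv_countP_or_disjoint informal
        (fun t => p.1 == t && q p) (fun t => ps.any (fun r => r.1 == t && q r)) hdisj
      simp only [List.any_cons, List.map_cons, List.sum_cons]
      rw [hsplit]
      push_cast
      rw [ih hnd.2]
      congr 1
      cases hq : q p with
      | true =>
          simp only [if_true, Bool.and_true]
          norm_cast
          simp only [List.count]
          exact List.countP_congr (fun t _ => by simp [BEq.comm])
      | false => simp

-- A's per-token test equals "some abbreviation item has this key and a qualifying value".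
theorem pv_pred_eq (formal_changed : List String) (abbreviations : List (String × String)) (t : String) :
    (match (PySem.Dict.ofList abbreviations).get? t with
      | some v => formal_changed.contains v
      | none => false) =
    (PySem.Dict.ofList abbreviations).items.any
      (fun p => p.1 == t && PySem.Set.contains (PySem.Set.ofList formal_changed) p.2) := by
  have hnd : (PySem.Dict.ofList abbreviations).keys.Nodup := PySem.Dict.nodup_keys_ofList abbreviations
  rw [Bool.eq_iff_iff]
  cases h : (PySem.Dict.ofList abbreviations).get? t with
  | none =>
      simp only [List.any_eq_true]
      constructor
      · intro hf; exact absurd hf (by simp)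
      · rintro ⟨⟨k, v⟩, hpi, hkt⟩
        simp only [Bool.and_eq_true] at hkt
        have hk : k = t := eq_of_beq hkt.1
        have hg := PySem.Dict.get?_of_mem_items _ hpi hnd
        rw [hk, h] at hg
        simp at hg
  | some v =>
      simp only [List.any_eq_true, List.contains_iff_mem]
      constructor
      · intro hv
        exact ⟨(t, v), (PySem.Dict.get?_eq_some_iff_mem_items _ _ _ hnd).1 h,
          by simp [PySem.Set.mem_ofList, hv]⟩
      · rintro ⟨⟨k, w⟩, hpi, hkw⟩
        simp only [Bool.and_eq_true] at hkw
        have hk : k = t := eq_of_beq hkw.1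
        have hg := PySem.Dict.get?_of_mem_items _ hpi hnd
        rw [hk, h] at hg
        obtain rfl : v = w := Option.some_inj.mp hg
        simpa [PySem.Set.contains_iff, PySem.Set.mem_ofList] using hkw.2

-- A's fold over the informal tokens is a countP of its per-token test.
theorem pv_A_eq_countP (informal_changed formal_changed : List String) (abbreviations : List (String × String)) :
    normalization_edit informal_changed formal_changed abbreviations =
      (informal_changed.countP (fun t =>
        match (PySem.Dict.ofList abbreviations).get? t with
        | some v => formal_changed.contains v
        | none => false) : Int) := by
  unfold normalization_edit
  rw [PySem.List.foldl_congr_mem informal_changed _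
    (fun edits t =>
      if (match (PySem.Dict.ofList abbreviations).get? t with
          | some v => formal_changed.contains v
          | none => false) then edits + 1 else edits)
    0
    (by
      intro acc t _
      rw [PySem.Dict.contains_eq_isSome_get?]
      cases h : (PySem.Dict.ofList abbreviations).get? t <;> simp [h])]
  rw [PySem.List.foldl_if_add_one]
  simp

-- B's fold over the abbreviation items is the sum of its per-entry contributions.
theorem pv_B_eq_sum (informal_changed formal_changed : List String) (abbreviations : List (String × String)) :
    normalization_edit_alt informal_changed formal_changed abbreviations =
      ((PySem.Dict.ofList abbreviations).items.map
        (fun p => if PySem.Set.contains (PySem.Set.ofList formal_changed) p.2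
                  then (informal_changed.count p.1 : Int) else 0)).sum := by
  unfold normalization_edit_alt
  rw [PySem.List.foldl_congr_mem _ _
    (fun total p => total +
      (if PySem.Set.contains (PySem.Set.ofList formal_changed) p.2
       then ((informal_changed.foldl (fun d t => d.insert t (d.getD t 0 + 1))
              PySem.Dict.empty).getD p.1 0) else 0)) 0
    (by
      intro acc p _
      by_cases hm : p.2 ∈ formal_changed <;> simp [hm])]
  rw [PySem.List.foldl_add]
  simp only [zero_add]
  refine congrArg List.sum (List.map_congr_left ?_)
  intro p _
  simp only [PySem.Dict.foldl_insert_getD_add_one_eq_counter, PySem.Dict.getD_counter]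

-- ===== VERDICT (by name: the statement is the Claim_ definition above) =====
theorem normalization_edit_spec : Claim_equal_normalization_edit := by
  intro informal_changed formal_changed abbreviations _
  unfold Spec_normalization_edit
  rw [pv_A_eq_countP, pv_B_eq_sum]
  rw [List.countP_congr (fun t _ => by rw [pv_pred_eq formal_changed abbreviations t])]
  exact pv_key_sum informal_changed (PySem.Dict.ofList abbreviations).items _
    (PySem.Dict.nodup_keys_ofList abbreviations)
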